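-- pv_equiv track=rewrite | github.com/jioome/Today-I-Learned | Algorithm/DP/cut.py | solution
-- ===== SOURCE A (Python) =====
-- def solution(n, times):
--     dp = [0] + [times[0] * i for i in range(n)]
--     # dp[i] 는 i 개의 줄 만드는데 걸린 시간
--     # dp[0] -> 그냥 배열 맞춰 주려고 넣음
--     # dp[1]은 그냥 한 줄 짜리 아무 것도 안 자른 것 / dp[1] = 0
--     # dp[2]은 한 번 자른 것 / dp[2] = times[0] 한 개 자른 시간
--
--     for i in range(3, n+1):  # dp[3] 부터 dp[n]까지 구한다.
--         for j in range(len(times)):  # j 번째 있는 것은 줄 j+1 개 자르는데 걸리는 시간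
--             if i-(j+1) >= (j+1):   # j+1 : 자르는 줄의 개수
--                 a = dp[i-(j+1)] + times[j]  # 걸리는 시간
--                 dp[i] = min(a, dp[i])
--
--     # 답은 dp[n]
--     return dp[n]
-- ===== SOURCE B (Python) =====
-- def solution(n, times):
--     # Forward (push) relaxation instead of A's backward pull: each reachable
--     # line-count i propagates its finished cost to i + j + 1 (cutting j+1 lines
--     # is allowed only once you already have at least j+1 lines).
--     if n < 1:
--         return 0
--     best = [None] * (n + 1)
--     best[1] = 0
--     for i in range(1, n):
--         b = best[i]
--         for j in range(min(i, len(times), n - i)):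
--             t = i + j + 1
--             c = b + times[j]
--             if best[t] is None or c < best[t]:
--                 best[t] = c
--     return best[n]
-- ===== Notes on version B (the rewrite author's own statement) =====
-- stated objective: alternative
-- what changed: B replaces A's backward pull DP (array seeded with the baseline times[0]*i, then for each i a guarded scan over all cut sizes relaxing dp[i] from dp[i-(j+1)]) with a forward push relaxation over an Option array: best starts all-None with best[1]=0, and each reachable line count i propagates its finished cost to best[i+j+1], so updates flow in the opposite direction and no baseline seeding exists.
import Mathlib
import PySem

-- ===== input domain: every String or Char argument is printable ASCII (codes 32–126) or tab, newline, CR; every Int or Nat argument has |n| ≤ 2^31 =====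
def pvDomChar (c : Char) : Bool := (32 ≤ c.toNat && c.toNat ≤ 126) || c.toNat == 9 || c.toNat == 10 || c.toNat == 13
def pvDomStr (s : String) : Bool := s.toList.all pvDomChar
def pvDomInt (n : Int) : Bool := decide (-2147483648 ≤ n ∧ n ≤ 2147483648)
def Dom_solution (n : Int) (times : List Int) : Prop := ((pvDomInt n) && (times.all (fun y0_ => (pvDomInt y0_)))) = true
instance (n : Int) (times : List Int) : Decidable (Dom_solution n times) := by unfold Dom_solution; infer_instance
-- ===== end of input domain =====

-- B replaces A's backward pull DP (baseline-seeded array, guarded relaxation scan over all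
-- cut sizes for each i) by a forward push relaxation over an Option array: each reachable
-- line count i propagates its finished cost to i + j + 1.  Alternative algorithm, same cost.

-- Python lists are arrays: both ports keep their list as a Lean Array so indexing and
-- assignment are O(1).  pvAGet / pvASet hand-port Python's xs[i] / xs[i] = v on an array,
-- exactly: they reuse PySem.List.pyIdx? (negative indices from the end; out of range =
-- IndexError, which Pre_ excludes, so the default is never read inside Pre_).
def pvAGet {α : Type} (xs : Array α) (i : Int) (d : α) : α :=
  match PySem.List.pyIdx? xs.size i with
  | some k => xs.getD k d
  | none => d

def pvASet {α : Type} (xs : Array α) (i : Int) (v : α) : Array α :=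
  match PySem.List.pyIdx? xs.size i with
  | some k => xs.setIfInBounds k v
  | none => xs

-- ===== PORT A =====
def solution (n : Int) (times : List Int) : Int :=
  let dp : Array Int :=
    ((0 : Int) :: (PySem.List.pyRange 0 n 1).map
      (fun i => PySem.List.pyGetD times 0 0 * i)).toArray
  let dp := (PySem.List.pyRange 3 (n + 1) 1).foldl (fun dp i =>
    (PySem.List.pyRange 0 (times.length : Int) 1).foldl (fun dp j =>
      if i - (j + 1) ≥ j + 1 then
        let a := pvAGet dp (i - (j + 1)) 0 + PySem.List.pyGetD times j 0
        let b := pvAGet dp i 0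
        pvASet dp i (if a ≤ b then a else b)   -- dp[i] = min(a, dp[i])
      else dp) dp) dp
  pvAGet dp n 0

-- ===== PORT B =====
def solution_alt (n : Int) (times : List Int) : Int :=
  if n < 1 then 0
  else
    let best : Array (Option Int) := Array.replicate (n + 1).toNat none
    let best := pvASet best 1 (some 0)
    let best := (PySem.List.pyRange 1 n 1).foldl (fun best i =>
      let b := pvAGet best i none
      (PySem.List.pyRange 0 (min (min i (times.length : Int)) (n - i)) 1).foldl (fun best j =>
        let t := i + j + 1
        -- b is never none when this inner body runs (Source B reads it the same way)
        let c := b.getD 0 + PySem.List.pyGetD times j 0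
        match pvAGet best t none with
        | none => pvASet best t (some c)
        | some cur => if c < cur then pvASet best t (some c) else best) best) best
    -- Python returns best[n]; under Pre_ that entry is always set
    (pvAGet best n none).getD 0

-- ===== PRECONDITION & SPEC =====
-- Pre_ excludes exactly the inputs on which the Python A raises IndexError:
-- n ≤ -2 (dp[n] out of range) and n ≥ 1 with empty times (times[0]).
def Pre_solution (n : Int) (times : List Int) : Prop :=
  -1 ≤ n ∧ (1 ≤ n → times ≠ [])
instance (n : Int) (times : List Int) : Decidable (Pre_solution n times) := by
  unfold Pre_solution; infer_instance
def pvWitness_solution : Int × List Int := (5, [2, 3])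

def Spec_solution (n : Int) (times : List Int) (out : Int) : Prop := out = solution_alt n times
instance (n : Int) (times : List Int) (out : Int) : Decidable (Spec_solution n times out) := by
  unfold Spec_solution; infer_instance

-- ===== CLAIM (what is proved, stated in full; the proofs are below) =====
def Claim_equal_solution : Prop := ∀ (n : Int) (times : List Int), Dom_solution n times → Pre_solution n times → Spec_solution n times (solution n times)

-- ===== LEMMAS AND PROOFS =====

-- list-level model of A's port (same code over List Int), used only in the proofs
def pvListA (n : Int) (times : List Int) : Int :=
  let dp : List Int :=
    0 :: (PySem.List.pyRange 0 n 1).map (fun i => PySem.List.pyGetD times 0 0 * i)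
  let dp := (PySem.List.pyRange 3 (n + 1) 1).foldl (fun dp i =>
    (PySem.List.pyRange 0 (times.length : Int) 1).foldl (fun dp j =>
      if i - (j + 1) ≥ j + 1 then
        let a := PySem.List.pyGetD dp (i - (j + 1)) 0 + PySem.List.pyGetD times j 0
        let b := PySem.List.pyGetD dp i 0
        PySem.List.pySetD dp i (if a ≤ b then a else b)
      else dp) dp) dp
  PySem.List.pyGetD dp n 0

lemma pvArrGetD {α : Type} (a : Array α) (k : Nat) (d : α) : a.getD k d = a.toList.getD k d := by
  unfold Array.getD List.getD
  split
  · next h =>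
    rw [List.getElem?_eq_getElem (by simpa using h)]
    simp [Array.getElem_toList]
  · next h =>
    rw [List.getElem?_eq_none (by simpa using h)]
    rfl

lemma pvAGet_toList {α : Type} (xs : Array α) (i : Int) (d : α) :
    pvAGet xs i d = PySem.List.pyGetD xs.toList i d := by
  unfold pvAGet PySem.List.pyGetD PySem.List.pyGet?
  rw [Array.length_toList]
  cases PySem.List.pyIdx? xs.size i with
  | none => rfl
  | some k =>
    simp only [Option.bind_some]
    rw [pvArrGetD]
    rfl

lemma pvASet_toList {α : Type} (xs : Array α) (i : Int) (v : α) :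
    (pvASet xs i v).toList = PySem.List.pySetD xs.toList i v := by
  unfold pvASet PySem.List.pySetD PySem.List.pySet?
  rw [Array.length_toList]
  cases PySem.List.pyIdx? xs.size i with
  | none => rfl
  | some k => simp [Array.toList_setIfInBounds]

lemma pvFoldl_toList {α : Type} (l : List Int) (f : Array α → Int → Array α)
    (g : List α → Int → List α) (a : Array α)
    (h : ∀ (b : Array α) (x : Int), x ∈ l → (f b x).toList = g b.toList x) :
    (l.foldl f a).toList = l.foldl g a.toList := by
  induction l generalizing a with
  | nil => rfl
  | cons x t ih =>
    simp only [List.foldl_cons]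
    rw [ih (f a x) (fun b y hy => h b y (List.mem_cons_of_mem x hy)),
      h a x List.mem_cons_self]

lemma pvSolutionA_eq (n : Int) (times : List Int) : solution n times = pvListA n times := by
  unfold solution pvListA
  simp only []
  rw [pvAGet_toList]
  congr 1
  rw [pvFoldl_toList _ _
      (fun dp i =>
        (PySem.List.pyRange 0 (times.length : Int)).foldl
          (fun dp j =>
            if i - (j + 1) ≥ j + 1 then
              PySem.List.pySetD dp i
                (if PySem.List.pyGetD dp (i - (j + 1)) 0 + PySem.List.pyGetD times j 0
                      ≤ PySem.List.pyGetD dp i 0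
                 then PySem.List.pyGetD dp (i - (j + 1)) 0 + PySem.List.pyGetD times j 0
                 else PySem.List.pyGetD dp i 0)
            else dp)
          dp) _
      (by
        intro b i _
        apply pvFoldl_toList
        intro c j _
        split
        · rw [pvASet_toList]
          congr 1
          rw [pvAGet_toList, pvAGet_toList]
        · rfl),
    List.toList_toArray]

-- the DP value: pvF times i = minimum time to obtain i lines (A's final dp[i], B's best[i])
def pvF (times : List Int) : Nat → Int
  | 0 => 0
  | 1 => 0
  | 2 => times.getD 0 0
  | (i+3) =>
      ((List.range (min times.length ((i+3)/2))).map
        (fun j => pvF times (i+2-j) + times.getD j 0)).foldl min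
        (pvF times (i+2) + times.getD 0 0)
decreasing_by all_goals omega

-- entry k of A's dp array after the outer loop has processed i = 3..i0
def pvG (times : List Int) (i0 k : Nat) : Int :=
  if k ≤ i0 then pvF times k else times.getD 0 0 * ((k : Int) - 1)

def pvInv (times : List Int) (N i0 : Nat) : List Int :=
  (List.range (N+1)).map (pvG times i0)

lemma pvF_le_base (times : List Int) :
    ∀ k : Nat, 1 ≤ k → pvF times k ≤ times.getD 0 0 * ((k : Int) - 1) := by
  intro k
  induction k using Nat.strong_induction_on with
  | _ k ih =>
    match k with
    | 0 => omega
    | 1 => intro _; simp [pvF]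
    | 2 => intro _; simp [pvF]
    | (i+3) =>
      intro _
      have h1 : pvF times (i+3) ≤ pvF times (i+2) + times.getD 0 0 := by
        simp only [pvF]
        exact (PySem.List.foldl_min_le _ _).1
      have h2 := ih (i+2) (by omega) (by omega)
      have : ((i:Int)+2) - 1 + 1 = ((i+3 : Nat) : Int) - 1 := by push_cast; ring
      calc pvF times (i+3) ≤ pvF times (i+2) + times.getD 0 0 := h1
        _ ≤ times.getD 0 0 * (((i+2 : Nat) : Int) - 1) + times.getD 0 0 := by linarith
        _ = times.getD 0 0 * (((i+3 : Nat) : Int) - 1) := by push_cast; ring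

-- the candidate list for i = m+3
def pvC (times : List Int) (m : Nat) : List Int :=
  (List.range (min times.length ((m+3)/2))).map
    (fun j => pvF times (m+2-j) + times.getD j 0)

lemma pvC_ne_nil (times : List Int) (ht : times ≠ []) (m : Nat) : pvC times m ≠ [] := by
  have : 1 ≤ times.length := List.length_pos_of_ne_nil ht
  have : 1 ≤ min times.length ((m+3)/2) := by omega
  simp [pvC, List.length_pos_iff.symm]
  omega

lemma pvC_head (times : List Int) (ht : times ≠ []) (m : Nat) (c : Int) (t : List Int)
    (hC : pvC times m = c :: t) : c = pvF times (m+2) + times.getD 0 0 := by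
  have h0 : (pvC times m).getD 0 0 = c := by rw [hC]; rfl
  have hmin : 1 ≤ min times.length ((m+3)/2) := by
    have : 1 ≤ times.length := List.length_pos_of_ne_nil ht
    omega
  rw [pvC, PySem.List.getD_map_range _ _ _ _ hmin] at h0
  simpa using h0.symm

lemma pvF_succ3 (times : List Int) (m : Nat) :
    pvF times (m+3) = (pvC times m).foldl min (pvF times (m+2) + times.getD 0 0) := by
  conv_lhs => rw [pvF]
  rfl

-- A's value at i = m+3: guarded min-relaxation seeded with the baseline
lemma pvAval (times : List Int) (ht : times ≠ []) (m : Nat) :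
    (pvC times m).foldl (fun b a => min a b)
      (times.getD 0 0 * (((m+3 : Nat) : Int) - 1)) = pvF times (m+3) := by
  obtain ⟨c, t, hC⟩ := List.exists_cons_of_ne_nil (pvC_ne_nil times ht m)
  have hc := pvC_head times ht m c t hC
  have hcomm : (fun (b a : Int) => min a b) = (fun (b a : Int) => min b a) := by
    funext b a; exact min_comm a b
  rw [hcomm, hC]
  set base := times.getD 0 0 * (((m+3 : Nat) : Int) - 1) with hbase
  have : (c :: t).foldl min base = min base (t.foldl min c) := by
    rw [List.foldl_cons, List.foldl_assoc]
  rw [this]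
  have hBv : t.foldl min c = pvF times (m+3) := by
    rw [pvF_succ3, hC, ← hc, List.foldl_cons, min_self]
  rw [hBv]
  apply min_eq_right
  calc pvF times (m+3) ≤ pvF times (m+2) + times.getD 0 0 := by
        rw [pvF_succ3]; exact (PySem.List.foldl_min_le _ _).1
    _ ≤ times.getD 0 0 * (((m+2 : Nat) : Int) - 1) + times.getD 0 0 := by
        have := pvF_le_base times (m+2) (by omega); linarith
    _ ≤ base := le_of_eq (by rw [hbase]; push_cast; ring)

lemma pvInv_length (times : List Int) (N i0 : Nat) : (pvInv times N i0).length = N + 1 := by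
  simp [pvInv]

lemma pvInv_getD (times : List Int) (N i0 k : Nat) (hk : k < N + 1) :
    (pvInv times N i0).getD k 0 = pvG times i0 k :=
  PySem.List.getD_map_range _ _ _ _ hk

lemma pvMapRange_set {α : Type} (f : Nat → α) (M k : Nat) (v : α) :
    ((List.range M).map f).set k v
      = (List.range M).map (fun x => if x = k then v else f x) := by
  apply List.ext_getElem
  · simp
  · intro x h1 h2
    simp only [List.getElem_set, List.getElem_map, List.getElem_range] at *
    split <;> split <;> first | rfl | omega

lemma pvInv_set (times : List Int) (N i0 k : Nat) (v : Int) :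
    (pvInv times N i0).set k v
      = (List.range (N+1)).map (fun x => if x = k then v else pvG times i0 x) :=
  pvMapRange_set _ _ _ _

lemma pvSet_self (times : List Int) (N m : Nat) :
    pvInv times N (m+2)
      = PySem.List.pySetD (pvInv times N (m+2)) (((m+3 : Nat) : Int))
          (times.getD 0 0 * (((m+3 : Nat) : Int) - 1)) := by
  rw [PySem.List.pySetD_natCast, pvInv_set]
  apply List.map_congr_left
  intro x hx
  split
  · next h => subst h; simp [pvG]
  · rfl

lemma pvSet_new (times : List Int) (N m : Nat) :
    PySem.List.pySetD (pvInv times N (m+2)) (((m+3 : Nat) : Int)) (pvF times (m+3))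
      = pvInv times N (m+3) := by
  rw [PySem.List.pySetD_natCast, pvInv_set]
  apply List.map_congr_left
  intro x hx
  split
  · next h => subst h; simp [pvG]
  · next h => simp only [pvG]; split <;> split <;> first | rfl | omega

lemma pvFilter (times : List Int) (m : Nat) :
    (PySem.List.pyRange 0 (times.length : Int)).filter
      (fun j => decide (((m+3 : Nat) : Int) - (j+1) ≥ j+1))
    = PySem.List.pyRange 0 (min (times.length : Int)
        (PySem.Int.floordiv ((m+3 : Nat) : Int) 2)) := by
  have hfd : PySem.Int.floordiv ((m+3 : Nat) : Int) 2 = ((m+3 : Nat) : Int) / 2 :=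
    PySem.Int.floordiv_eq_ediv_of_pos (by norm_num)
  rw [hfd]
  set b : Int := min (times.length : Int) (((m+3 : Nat) : Int) / 2) with hb
  have hb0 : (0 : Int) ≤ b := by omega
  have hb2 : b ≤ (times.length : Int) := by omega
  rw [PySem.List.pyRange_one_append 0 b (times.length : Int) hb0 hb2, List.filter_append]
  have h1 : (PySem.List.pyRange 0 b).filter
      (fun j => decide (((m+3 : Nat) : Int) - (j+1) ≥ j+1))
      = PySem.List.pyRange 0 b := by
    apply List.filter_eq_self.mpr
    intro j hj
    rw [PySem.List.mem_pyRange_one] at hj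
    simp only [decide_eq_true_iff]
    omega
  have h2 : (PySem.List.pyRange b (times.length : Int)).filter
      (fun j => decide (((m+3 : Nat) : Int) - (j+1) ≥ j+1)) = [] := by
    apply List.filter_eq_nil_iff.mpr
    intro j hj
    rw [PySem.List.mem_pyRange_one] at hj
    simp only [decide_eq_true_iff]
    omega
  rw [h1, h2, List.append_nil]

lemma pvInnerA (times : List Int) (N m : Nat) (hm : m + 3 ≤ N) :
    ∀ (jl : List Int),
      (∀ j ∈ jl, 0 ≤ j ∧ j < min (times.length : Int) (((m+3 : Nat) : Int) / 2)) →
      ∀ acc : Int,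
      jl.foldl (fun dp j =>
          PySem.List.pySetD dp ((m+3 : Nat) : Int)
            (if PySem.List.pyGetD dp (((m+3 : Nat) : Int) - (j+1)) 0
                  + PySem.List.pyGetD times j 0
                ≤ PySem.List.pyGetD dp ((m+3 : Nat) : Int) 0
             then PySem.List.pyGetD dp (((m+3 : Nat) : Int) - (j+1)) 0
                  + PySem.List.pyGetD times j 0
             else PySem.List.pyGetD dp ((m+3 : Nat) : Int) 0))
        (PySem.List.pySetD (pvInv times N (m+2)) ((m+3 : Nat) : Int) acc)
      = PySem.List.pySetD (pvInv times N (m+2)) ((m+3 : Nat) : Int)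
          (jl.foldl (fun b j =>
              min (pvF times (m+2 - j.toNat) + times.getD j.toNat 0) b) acc) := by
  intro jl
  induction jl with
  | nil => intro _ acc; rfl
  | cons j t ihjl =>
    intro hmem acc
    obtain ⟨hj0, hjb⟩ := hmem j (List.mem_cons_self)
    set jn := j.toNat with hjn
    have hj : j = (jn : Int) := by omega
    have hjm : jn ≤ m + 1 := by omega
    have hlen : m + 3 < (pvInv times N (m+2)).length := by rw [pvInv_length]; omega
    have hidx : ((m+3 : Nat) : Int) - ((jn : Int) + 1) = ((m + 2 - jn : Nat) : Int) := by
      push_cast [Nat.cast_sub (by omega : jn ≤ m + 2)]; ring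
    have r1 : PySem.List.pyGetD (PySem.List.pySetD (pvInv times N (m+2)) ((m+3 : Nat) : Int) acc)
        ((m + 2 - jn : Nat) : Int) 0 = pvF times (m + 2 - jn) := by
      rw [PySem.List.pyGetD_pySetD_natCast _ _ _ _ _ hlen, if_neg (by omega),
        PySem.List.pyGetD_natCast, pvInv_getD _ _ _ _ (by omega)]
      simp only [pvG, if_pos (by omega : m + 2 - jn ≤ m + 2)]
    have r3 : PySem.List.pyGetD (PySem.List.pySetD (pvInv times N (m+2)) ((m+3 : Nat) : Int) acc)
        ((m+3 : Nat) : Int) 0 = acc := by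
      rw [PySem.List.pyGetD_pySetD_natCast _ _ _ _ _ hlen, if_pos rfl]
    simp only [List.foldl_cons]
    rw [hj, hidx, r1, PySem.List.pyGetD_natCast, r3]
    have w : ∀ v : Int,
        PySem.List.pySetD (PySem.List.pySetD (pvInv times N (m+2)) ((m+3 : Nat) : Int) acc)
          ((m+3 : Nat) : Int) v
        = PySem.List.pySetD (pvInv times N (m+2)) ((m+3 : Nat) : Int) v := by
      intro v
      rw [PySem.List.pySetD_natCast, PySem.List.pySetD_natCast, PySem.List.pySetD_natCast,
        List.set_set]
    rw [w, ihjl (fun x hx => hmem x (List.mem_cons_of_mem j hx))]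
    congr 1

lemma pvBndCast (times : List Int) (m : Nat) :
    min (times.length : Int) (PySem.Int.floordiv ((m+3 : Nat) : Int) 2)
      = ((min times.length ((m+3)/2) : Nat) : Int) := by
  rw [PySem.Int.floordiv_eq_ediv_of_pos (by norm_num)]
  omega

lemma pvStepA (times : List Int) (ht : times ≠ []) (N m : Nat) (hm : m + 3 ≤ N) :
    (PySem.List.pyRange 0 (times.length : Int)).foldl
      (fun dp j =>
        if ((m+3 : Nat) : Int) - (j + 1) ≥ j + 1 then
          PySem.List.pySetD dp ((m+3 : Nat) : Int)
            (if PySem.List.pyGetD dp (((m+3 : Nat) : Int) - (j + 1)) 0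
                  + PySem.List.pyGetD times j 0
                ≤ PySem.List.pyGetD dp ((m+3 : Nat) : Int) 0
             then PySem.List.pyGetD dp (((m+3 : Nat) : Int) - (j + 1)) 0
                  + PySem.List.pyGetD times j 0
             else PySem.List.pyGetD dp ((m+3 : Nat) : Int) 0)
        else dp)
      (pvInv times N (m+2))
    = pvInv times N (m+3) := by
  rw [PySem.List.foldl_ite_eq_foldl_filter
      (p := fun j => ((m+3 : Nat) : Int) - (j + 1) ≥ j + 1), pvFilter]
  conv_lhs => rw [pvSet_self times N m]
  rw [pvInnerA times N m hm _ (by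
    intro j hj
    rw [PySem.List.mem_pyRange_one] at hj
    constructor
    · exact hj.1
    · have h2 := hj.2
      rw [pvBndCast] at h2
      have : ((m+3 : Nat) : Int) / 2 = (((m+3)/2 : Nat) : Int) := by omega
      rw [this]
      omega)]
  rw [pvBndCast, PySem.List.pyRange_zero_nat, List.foldl_map]
  have hfold :
      (List.range (min times.length ((m+3)/2))).foldl
        (fun b (jn : Nat) =>
          min (pvF times (m + 2 - ((jn : Int)).toNat) + times.getD ((jn : Int)).toNat 0) b)
        (times.getD 0 0 * (((m+3 : Nat) : Int) - 1))
      = (pvC times m).foldl (fun b a => min a b)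
        (times.getD 0 0 * (((m+3 : Nat) : Int) - 1)) := by
    rw [pvC, List.foldl_map]
    simp
  rw [hfold, pvAval times ht m, pvSet_new]

lemma pvInitA (times : List Int) (N : Nat) :
    (0 : Int) :: (PySem.List.pyRange 0 ((N : Nat) : Int)).map
      (fun i => PySem.List.pyGetD times 0 0 * i)
    = pvInv times N 2 := by
  rw [PySem.List.pyRange_zero_nat, List.map_map]
  apply List.ext_getElem
  · simp [pvInv]
  · intro k h1 h2
    match k with
    | 0 => simp [pvInv, pvG, pvF]
    | 1 =>
      simp [pvInv, pvG, pvF]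
    | 2 =>
      simp [pvInv, pvG, pvF, PySem.List.pyGetD_zero]
    | (k+3) =>
      simp only [List.getElem_cons_succ, List.getElem_map, List.getElem_range,
        Function.comp_apply, pvInv]
      rw [PySem.List.pyGetD_zero]
      simp only [pvG, if_neg (by omega : ¬ (k+3 ≤ 2))]
      push_cast
      ring

lemma pvOuterA (times : List Int) (ht : times ≠ []) (N : Nat) :
    ∀ m : Nat, m + 2 ≤ N →
    (PySem.List.pyRange 3 (((m+2 : Nat) : Int) + 1)).foldl
      (fun dp i =>
        (PySem.List.pyRange 0 (times.length : Int)).foldl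
          (fun dp j =>
            if i - (j + 1) ≥ j + 1 then
              PySem.List.pySetD dp i
                (if PySem.List.pyGetD dp (i - (j + 1)) 0 + PySem.List.pyGetD times j 0
                      ≤ PySem.List.pyGetD dp i 0
                 then PySem.List.pyGetD dp (i - (j + 1)) 0 + PySem.List.pyGetD times j 0
                 else PySem.List.pyGetD dp i 0)
            else dp)
          dp)
      (pvInv times N 2)
    = pvInv times N (m+2) := by
  intro m
  induction m with
  | zero =>
    intro _
    rw [PySem.List.pyRange_one_eq_nil (a := 3) (b := ((0+2 : Nat) : Int) + 1) (by norm_num)]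
    rfl
  | succ m ih =>
    intro hm
    have hc : (((m+1+2 : Nat) : Int) + 1) = ((m+3 : Nat) : Int) + 1 := by push_cast; ring
    have hsplit : PySem.List.pyRange 3 (((m+3 : Nat) : Int) + 1)
        = PySem.List.pyRange 3 (((m+2 : Nat) : Int) + 1) ++ [((m+3 : Nat) : Int)] := by
      have hcast : ((m+3 : Nat) : Int) = ((m+2 : Nat) : Int) + 1 := by push_cast; ring
      rw [PySem.List.pyRange_one_succ_right (by push_cast; omega), hcast]
    rw [hc, hsplit, List.foldl_append, ih (by omega), List.foldl_cons, List.foldl_nil]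
    exact pvStepA times ht N m (by omega)

-- ===== B-side proof machinery (forward push DP) =====

-- min of a list as an Option (none = empty)
def pvOptMin (l : List Int) : Option Int :=
  match l with
  | [] => none
  | x :: xs => some (xs.foldl min x)

-- the candidate value written into best[t] from predecessor t-(j+1)
def pvCd (times : List Int) (t j : Nat) : Int :=
  pvF times (t - (j+1)) + times.getD j 0

-- entry t of B's best array after the outer loop has processed i = 1..i0:
-- optional min over the candidates whose predecessor is already finalised
def pvE (times : List Int) (i0 t : Nat) : Option Int :=
  if t = 1 then some 0
  else pvOptMin ((List.range' (t - 1 - i0)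
      (min times.length (t/2) - (t - 1 - i0))).map (pvCd times t))

def pvBst (times : List Int) (N i0 : Nat) : List (Option Int) :=
  (List.range (N+1)).map (pvE times i0)

-- entry t mid-way through outer iteration i = i0+1, after inner j = 0..j0-1
def pvMd (times : List Int) (i0 j0 t : Nat) : Option Int :=
  if t < i0 + j0 + 2 then pvE times (i0+1) t else pvE times i0 t

def pvMst (times : List Int) (N i0 j0 : Nat) : List (Option Int) :=
  (List.range (N+1)).map (pvMd times i0 j0)

lemma pvOptMin_foldl (l : List Int) (x : Int) :
    l.foldl min x = match pvOptMin l with | none => x | some m => min x m := by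
  induction l generalizing x with
  | nil => rfl
  | cons y ys ih =>
    show ys.foldl min (min x y) = min x (ys.foldl min y)
    rw [ih (min x y), ih y]
    cases pvOptMin ys with
    | none => rfl
    | some m => exact min_assoc x y m

lemma pvOptMin_shrink (f : Nat → Int) (lo hi : Nat) (hlt : lo < hi) :
    pvOptMin ((List.range' lo (hi - lo)).map f)
      = some (match pvOptMin ((List.range' (lo+1) (hi - (lo+1))).map f) with
              | none => f lo
              | some m => min (f lo) m) := by
  have h1 : hi - lo = (hi - (lo+1)) + 1 := by omega
  rw [h1]
  have h2 : (List.range' lo ((hi - (lo+1)) + 1)).map f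
      = f lo :: (List.range' (lo+1) (hi - (lo+1))).map f := by
    rw [List.range'_succ]
    rfl
  rw [h2]
  show some (((List.range' (lo+1) (hi - (lo+1))).map f).foldl min (f lo)) = _
  rw [pvOptMin_foldl]

-- an empty candidate interval gives none
lemma pvE_none (times : List Int) (i0 t : Nat) (ht1 : t ≠ 1)
    (h : min times.length (t/2) ≤ t - 1 - i0) : pvE times i0 t = none := by
  unfold pvE
  rw [if_neg ht1]
  have : min times.length (t/2) - (t - 1 - i0) = 0 := by omega
  rw [this]
  rfl

-- once every predecessor is finalised, the entry is the DP value itself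
lemma pvE_full (times : List Int) (ht : times ≠ []) (i0 t : Nat)
    (h2 : 2 ≤ t) (hle : t ≤ i0 + 1) : pvE times i0 t = some (pvF times t) := by
  have hL : 1 ≤ times.length := List.length_pos_of_ne_nil ht
  have hlo : t - 1 - i0 = 0 := by omega
  unfold pvE
  rw [if_neg (by omega), hlo]
  rw [Nat.sub_zero, ← List.range_eq_range']
  match t, h2 with
  | 2, _ =>
    have : min times.length (2/2) = 1 := by omega
    rw [this]
    show pvOptMin [pvCd times 2 0] = _
    unfold pvOptMin pvCd
    simp [pvF]
  | (m+3), _ =>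
    have hC : (List.range (min times.length ((m+3)/2))).map (pvCd times (m+3))
        = pvC times m := by
      unfold pvC
      apply List.map_congr_left
      intro j _
      unfold pvCd
      congr 2
      omega
    rw [hC]
    obtain ⟨c, rest, hCc⟩ := List.exists_cons_of_ne_nil (pvC_ne_nil times ht m)
    have hc := pvC_head times ht m c rest hCc
    rw [hCc]
    show some (rest.foldl min c) = _
    congr 1
    rw [pvF_succ3, hCc, ← hc, List.foldl_cons, min_self]

-- value of best[i] when outer iteration i = i0+1 begins
lemma pvE_self (times : List Int) (ht : times ≠ []) (i0 : Nat) :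
    pvE times i0 (i0+1) = some (pvF times (i0+1)) := by
  match i0 with
  | 0 => unfold pvE; simp [pvF]
  | (k+1) => exact pvE_full times ht (k+1) (k+2) (by omega) (by omega)

lemma pvBst_getD (times : List Int) (N i0 t : Nat) (hk : t < N + 1) :
    (pvBst times N i0).getD t none = pvE times i0 t :=
  PySem.List.getD_map_range _ _ _ _ hk

lemma pvMst_getD (times : List Int) (N i0 j0 t : Nat) (hk : t < N + 1) :
    (pvMst times N i0 j0).getD t none = pvMd times i0 j0 t :=
  PySem.List.getD_map_range _ _ _ _ hk

-- before the first inner step nothing is updated yet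
lemma pvMst_zero (times : List Int) (N i0 : Nat) :
    pvMst times N i0 0 = pvBst times N i0 := by
  unfold pvMst pvBst
  apply List.map_congr_left
  intro t _
  unfold pvMd
  split
  · next h =>
    -- t ≤ i0 + 1: both entries are equal (same truncated interval, or the t = 1 cell)
    by_cases h1 : t = 1
    · subst h1; unfold pvE; simp
    · unfold pvE
      rw [if_neg h1, if_neg h1]
      have e1 : t - 1 - (i0+1) = 0 := by omega
      have e2 : t - 1 - i0 = 0 := by omega
      rw [e1, e2]
  · rfl

-- after the last inner step the new column i0+1 is fully incorporated
lemma pvMst_last (times : List Int) (N i0 : Nat) (hN : 2 ≤ N) :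
    pvMst times N i0 (min (min (i0+1) times.length) (N - (i0+1)))
      = pvBst times N (i0+1) := by
  unfold pvMst pvBst
  apply List.map_congr_left
  intro t htm
  rw [List.mem_range] at htm
  set K := min (min (i0+1) times.length) (N - (i0+1)) with hK
  unfold pvMd
  split
  · rfl
  · next h =>
    -- t ≥ i0 + K + 2 and t ≤ N: both intervals are empty
    have htK : i0 + K + 2 ≤ t := by omega
    by_cases h1 : t = 1
    · subst h1
      have : K = 0 := by omega
      omega
    · have hhi : min times.length (t/2) ≤ t - 1 - i0 ∧ min times.length (t/2) ≤ t - 1 - (i0+1) := by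
        rcases Nat.lt_or_ge K times.length with hKL | hKL
        · -- length not binding: K = min (i0+1) (N-(i0+1))
          have hKv : K = min (i0+1) (N - (i0+1)) := by omega
          rcases Nat.le_total (i0+1) (N - (i0+1)) with hcase | hcase
          · -- K = i0+1: t ≥ 2i0+3, so t/2 ≤ t - i0 - 2
            have : K = i0 + 1 := by omega
            constructor <;> (apply le_trans (Nat.min_le_right _ _); omega)
          · -- K = N - (i0+1): t > N, impossible
            omega
        · -- K = times.length ≤ t - 1 - (i0+1)
          constructor <;> (apply le_trans (Nat.min_le_left _ _); omega)
      rw [pvE_none times i0 t h1 hhi.1, pvE_none times (i0+1) t h1 hhi.2]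

-- one inner step: incorporating candidate j0 into best[i0+j0+2]
lemma pvStepInner (times : List Int) (N i0 j0 : Nat)
    (hj0 : j0 < min (min (i0+1) times.length) (N - (i0+1))) :
    (fun best (j : Int) =>
      let t := ((i0+1 : Nat) : Int) + j + 1
      let c := pvF times (i0+1) + PySem.List.pyGetD times j 0
      match PySem.List.pyGetD best t none with
      | none => PySem.List.pySetD best t (some c)
      | some cur => if c < cur then PySem.List.pySetD best t (some c) else best)
      (pvMst times N i0 j0) ((j0 : Nat) : Int)
    = pvMst times N i0 (j0+1) := by
  simp only []
  set tN : Nat := i0 + j0 + 2 with htN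
  have hcast : ((i0+1 : Nat) : Int) + ((j0 : Nat) : Int) + 1 = ((tN : Nat) : Int) := by
    push_cast; omega
  have htNN : tN < N + 1 := by omega
  have hlen : tN < (pvMst times N i0 j0).length := by
    unfold pvMst; simp; omega
  have hget : PySem.List.pyGetD (pvMst times N i0 j0) ((tN : Nat) : Int) none
      = pvE times i0 tN := by
    rw [PySem.List.pyGetD_natCast, pvMst_getD times N i0 j0 tN htNN]
    unfold pvMd
    rw [if_neg (by omega)]
  have hc : pvF times (i0+1) + PySem.List.pyGetD times ((j0 : Nat) : Int) 0
      = pvCd times tN j0 := by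
    rw [PySem.List.pyGetD_natCast]
    unfold pvCd
    congr 2
    omega
  have hhi : j0 < min times.length (tN/2) := by
    have h1 : j0 < times.length := by omega
    have h2 : j0 < tN/2 := by omega
    omega
  have hlo : tN - 1 - i0 = j0 + 1 := by omega
  have hlo' : tN - 1 - (i0+1) = j0 := by omega
  have hE : pvE times i0 tN
      = pvOptMin ((List.range' (j0+1) (min times.length (tN/2) - (j0+1))).map (pvCd times tN)) := by
    unfold pvE
    rw [if_neg (by omega), hlo]
  have hE' : pvE times (i0+1) tN
      = some (match pvOptMin ((List.range' (j0+1)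
            (min times.length (tN/2) - (j0+1))).map (pvCd times tN)) with
          | none => pvCd times tN j0
          | some m => min (pvCd times tN j0) m) := by
    unfold pvE
    rw [if_neg (by omega), hlo']
    exact pvOptMin_shrink (pvCd times tN) j0 (min times.length (tN/2)) hhi
  -- pointwise description of the target state
  have htarget : ∀ x, x < N + 1 → x ≠ tN → pvMd times i0 (j0+1) x = pvMd times i0 j0 x := by
    intro x _ hxne
    unfold pvMd
    rcases Nat.lt_or_ge x (i0 + j0 + 2) with hx | hx
    · rw [if_pos (by omega), if_pos (by omega)]
    · rw [if_neg (by omega), if_neg (by omega)]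
  have hsetgoal : ∀ v : Option Int, v = pvMd times i0 (j0+1) tN →
      PySem.List.pySetD (pvMst times N i0 j0) ((tN : Nat) : Int) v
        = pvMst times N i0 (j0+1) := by
    intro v hv
    rw [PySem.List.pySetD_natCast]
    unfold pvMst
    rw [pvMapRange_set]
    apply List.map_congr_left
    intro x hx
    rw [List.mem_range] at hx
    split
    · next h => subst h; exact hv
    · next h => exact (htarget x hx h).symm
  have hmdtN : pvMd times i0 (j0+1) tN = pvE times (i0+1) tN := by
    unfold pvMd
    rw [if_pos (by omega)]
  rw [hcast, hget, hc, hE]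
  cases hR : pvOptMin ((List.range' (j0+1)
      (min times.length (tN/2) - (j0+1))).map (pvCd times tN)) with
  | none =>
    apply hsetgoal
    rw [hmdtN, hE', hR]
  | some cur =>
    simp only []
    split
    · next hlt =>
      apply hsetgoal
      rw [hmdtN, hE', hR]
      simp only []
      rw [min_eq_left (le_of_lt hlt)]
    · next hnlt =>
      -- no update: the entry already holds the smaller value
      have : pvMst times N i0 j0 = pvMst times N i0 (j0+1) := by
        unfold pvMst
        apply List.map_congr_left
        intro x hx
        rw [List.mem_range] at hx
        by_cases hxe : x = tN
        · subst hxe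
          have h1 : pvMd times i0 j0 tN = pvE times i0 tN := by
            unfold pvMd; rw [if_neg (by omega)]
          rw [h1, hmdtN, hE', hR, hE, hR]
          simp only []
          rw [min_eq_right (le_of_not_gt hnlt)]
        · exact (htarget x hx hxe).symm
      exact this
  
-- the whole inner loop of outer iteration i = i0+1
lemma pvInnerB (times : List Int) (N i0 : Nat) :
    ∀ j0 : Nat, j0 ≤ min (min (i0+1) times.length) (N - (i0+1)) →
    (List.range j0).foldl
      (fun best (jn : Nat) =>
        (fun best (j : Int) =>
          let t := ((i0+1 : Nat) : Int) + j + 1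
          let c := pvF times (i0+1) + PySem.List.pyGetD times j 0
          match PySem.List.pyGetD best t none with
          | none => PySem.List.pySetD best t (some c)
          | some cur => if c < cur then PySem.List.pySetD best t (some c) else best)
          best ((jn : Nat) : Int))
      (pvBst times N i0)
    = pvMst times N i0 j0 := by
  intro j0
  induction j0 with
  | zero => intro _; rw [List.range_zero, List.foldl_nil, pvMst_zero]
  | succ j0 ih =>
    intro hj0
    rw [List.range_succ, List.foldl_append, ih (by omega), List.foldl_cons, List.foldl_nil]
    exact pvStepInner times N i0 j0 (by omega)

-- list-level model of B's port after the n < 1 test, for n = N ≥ 2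
def pvListB (N : Nat) (times : List Int) : Int :=
  let best : List (Option Int) := List.replicate (((N : Nat) : Int) + 1).toNat none
  let best := PySem.List.pySetD best 1 (some 0)
  let best := (PySem.List.pyRange 1 ((N : Nat) : Int)).foldl (fun best i =>
    let b := PySem.List.pyGetD best i none
    (PySem.List.pyRange 0 (min (min i (times.length : Int)) (((N : Nat) : Int) - i))).foldl
      (fun best j =>
        let t := i + j + 1
        let c := b.getD 0 + PySem.List.pyGetD times j 0
        match PySem.List.pyGetD best t none with
        | none => PySem.List.pySetD best t (some c)
        | some cur => if c < cur then PySem.List.pySetD best t (some c) else best) best) best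
  (PySem.List.pyGetD best ((N : Nat) : Int) none).getD 0

lemma pvInitB (times : List Int) (N : Nat) :
    PySem.List.pySetD (List.replicate (((N : Nat) : Int) + 1).toNat (none : Option Int))
      1 (some 0) = pvBst times N 0 := by
  have h1 : (((N : Nat) : Int) + 1).toNat = N + 1 := by omega
  have h2 : PySem.List.pySetD (List.replicate (N+1) (none : Option Int)) 1 (some 0)
      = (List.replicate (N+1) (none : Option Int)).set 1 (some 0) := by
    have : (1 : Int) = ((1 : Nat) : Int) := rfl
    rw [this, PySem.List.pySetD_natCast]
  rw [h1, h2]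
  apply List.ext_getElem
  · simp [pvBst]
  · intro k hk1 hk2
    simp only [List.getElem_set, List.getElem_replicate, pvBst, List.getElem_map,
      List.getElem_range]
    split
    · next h =>
      subst h
      unfold pvE
      simp
    · next h =>
      rw [(pvE_none times 0 k (by omega) (by omega)).symm]

-- one outer iteration i = i0+1
lemma pvStepB (times : List Int) (ht : times ≠ []) (N i0 : Nat)
    (hiN : i0 + 1 ≤ N) (hN : 2 ≤ N) :
    (fun best (i : Int) =>
      let b := PySem.List.pyGetD best i none
      (PySem.List.pyRange 0 (min (min i (times.length : Int)) (((N : Nat) : Int) - i))).foldl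
        (fun best j =>
          let t := i + j + 1
          let c := b.getD 0 + PySem.List.pyGetD times j 0
          match PySem.List.pyGetD best t none with
          | none => PySem.List.pySetD best t (some c)
          | some cur => if c < cur then PySem.List.pySetD best t (some c) else best) best)
      (pvBst times N i0) ((i0+1 : Nat) : Int)
    = pvBst times N (i0+1) := by
  simp only []
  have hb : PySem.List.pyGetD (pvBst times N i0) ((i0+1 : Nat) : Int) none
      = some (pvF times (i0+1)) := by
    rw [PySem.List.pyGetD_natCast, pvBst_getD times N i0 (i0+1) (by omega)]
    exact pvE_self times ht i0
  rw [hb]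
  set Knat : Nat := min (min (i0+1) times.length) (N - (i0+1)) with hK
  have hKc : min (min ((i0+1 : Nat) : Int) (times.length : Int))
      (((N : Nat) : Int) - ((i0+1 : Nat) : Int)) = ((Knat : Nat) : Int) := by
    rw [hK]
    push_cast
    omega
  rw [hKc, PySem.List.pyRange_zero_nat, List.foldl_map]
  have := pvInnerB times N i0 Knat (le_refl _)
  simp only [Option.getD_some] at this ⊢
  rw [this]
  exact pvMst_last times N i0 hN

lemma pvOuterB (times : List Int) (ht : times ≠ []) (N : Nat) (hN : 2 ≤ N) :
    ∀ m : Nat, m ≤ N →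
    (PySem.List.pyRange 1 ((m : Nat) : Int) 1).foldl
      (fun best (i : Int) =>
        let b := PySem.List.pyGetD best i none
        (PySem.List.pyRange 0 (min (min i (times.length : Int)) (((N : Nat) : Int) - i))).foldl
          (fun best j =>
            let t := i + j + 1
            let c := b.getD 0 + PySem.List.pyGetD times j 0
            match PySem.List.pyGetD best t none with
            | none => PySem.List.pySetD best t (some c)
            | some cur => if c < cur then PySem.List.pySetD best t (some c) else best) best)
      (pvBst times N 0)
    = pvBst times N (m - 1) := by
  intro m
  induction m with
  | zero =>
    intro _
    rw [PySem.List.pyRange_one_eq_nil (by norm_num)]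
    rfl
  | succ m ih =>
    intro hm
    match m, hm with
    | 0, _ =>
      rw [PySem.List.pyRange_one_eq_nil (by norm_num)]
      rfl
    | (m+1), hm =>
      have hsplit : PySem.List.pyRange 1 ((m+2 : Nat) : Int)
          = PySem.List.pyRange 1 ((m+1 : Nat) : Int) ++ [((m+1 : Nat) : Int)] := by
        have hcast : ((m+2 : Nat) : Int) = ((m+1 : Nat) : Int) + 1 := by push_cast; ring
        rw [hcast, PySem.List.pyRange_one_succ_right (by push_cast; omega)]
      rw [hsplit, List.foldl_append, ih (by omega), List.foldl_cons, List.foldl_nil]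
      exact pvStepB times ht N m (by omega) hN

lemma pvListB_eq (times : List Int) (ht : times ≠ []) (N : Nat) (hN : 2 ≤ N) :
    pvListB N times = pvF times N := by
  unfold pvListB
  simp only []
  rw [pvInitB times N]
  have hout := pvOuterB times ht N hN N (le_refl _)
  simp only [] at hout ⊢
  rw [hout, PySem.List.pyGetD_natCast, pvBst_getD times N (N-1) N (by omega),
    pvE_full times ht (N-1) N hN (by omega)]
  rfl

lemma pvSolutionB_list (times : List Int) (N : Nat) (hN : 1 ≤ N) :
    solution_alt ((N : Nat) : Int) times = pvListB N times := by
  unfold solution_alt pvListB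
  rw [if_neg (by omega : ¬ (((N : Nat) : Int) < 1))]
  simp only []
  rw [pvAGet_toList]
  congr 1
  rw [pvFoldl_toList _ _
      (fun best (i : Int) =>
        let b := PySem.List.pyGetD best i none
        (PySem.List.pyRange 0 (min (min i (times.length : Int))
            (((N : Nat) : Int) - i))).foldl
          (fun best j =>
            let t := i + j + 1
            let c := b.getD 0 + PySem.List.pyGetD times j 0
            match PySem.List.pyGetD best t none with
            | none => PySem.List.pySetD best t (some c)
            | some cur => if c < cur then PySem.List.pySetD best t (some c) else best)
          best) _
      (by
        intro b i _
        rw [pvAGet_toList]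
        apply pvFoldl_toList
        intro c j _
        rw [pvAGet_toList]
        cases h : PySem.List.pyGetD c.toList (i + j + 1) none with
        | none =>
          simp only [h]
          exact pvASet_toList _ _ _
        | some cur =>
          simp only [h]
          split
          · exact pvASet_toList _ _ _
          · rfl),
    pvASet_toList, Array.toList_replicate]

lemma pvSolutionB_eq (times : List Int) (ht : times ≠ []) (N : Nat) (hN : 2 ≤ N) :
    solution_alt ((N : Nat) : Int) times = pvF times N := by
  rw [pvSolutionB_list times N (by omega)]
  exact pvListB_eq times ht N hN

-- ===== VERDICT (by name: the statement is the Claim_ definition above) =====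
theorem solution_spec : Claim_equal_solution := by
  intro n times _hDom hPre
  unfold Spec_solution
  rw [pvSolutionA_eq]
  obtain ⟨hn1, hne⟩ := hPre
  by_cases hsmall : n ≤ 1
  · interval_cases n
    · have e1 : PySem.List.pyRange (0 : Int) (-1) = [] :=
        PySem.List.pyRange_one_eq_nil (by norm_num)
      simp [pvListA, solution_alt, e1]
      decide
    · have e1 : PySem.List.pyRange (0 : Int) 0 = [] :=
        PySem.List.pyRange_one_eq_nil (by norm_num)
      simp [pvListA, solution_alt, e1]
    · have e1 : PySem.List.pyRange (0 : Int) 1 = [0] := by decide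
      simp [pvListA, solution_alt, e1]
      decide
  · have hn2 : 2 ≤ n := by omega
    have ht : times ≠ [] := hne (by omega)
    have hcast : n = (n.toNat : Int) := by omega
    set N := n.toNat with hN
    have hN2 : 2 ≤ N := by omega
    have hmN : N - 2 + 2 = N := by omega
    rw [hcast, pvSolutionB_eq times ht N hN2]
    unfold pvListA
    simp only []
    rw [pvInitA times N]
    have hout := pvOuterA times ht N (N - 2) (by omega)
    rw [hmN] at hout
    rw [hout, PySem.List.pyGetD_natCast, pvInv_getD times N N N (by omega)]
    simp [pvG]
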